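-- pv_equiv track=rewrite | github.com/anilsenay/2048-Game-AI | heuristics/heuristic_4.py | heuristic5
-- ===== SOURCE A (Python) =====
-- from math import floor
--
-- def heuristic5(BOARD):
--     score = 0
--     for power in reversed(range(0, 16)):
--         i = floor(4 - ((power + 1) / 4))
--         j = (4 - ((power + 1) % 4)) % 4 if (i % 2 == 0) else (((power) % 4))
--
--         if(BOARD[i][j] != 0):
--             score = score + ((4 ** power)*BOARD[i][j])
--     return score
-- ===== SOURCE B (Python) =====
-- def snake_cells(BOARD):
--     """Cells of the 4x4 board in boustrophedon (snake) order of descending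
--     significance: row 0 left-to-right, row 1 right-to-left, and so on."""
--     cells = []
--     for i in range(4):
--         js = range(4) if i % 2 == 0 else reversed(range(4))
--         cells.extend(BOARD[i][j] for j in js)
--     return cells
--
-- def heuristic5(BOARD):
--     # Horner evaluation in base 4: the snake-ordered cells are the base-4
--     # "digits" of the score, most significant first.
--     score = 0
--     for c in snake_cells(BOARD):
--         score = score * 4 + c
--     return score
-- ===== Notes on version B (the rewrite author's own statement) =====
-- stated objective: alternative
-- what changed: B has no powers or weights at all: it first linearises the board into snake (boustrophedon) order of descending significance, then evaluates the score as a base-4 Horner scheme (score = score*4 + cell), replacing A's per-power floor/modulo index computation and 4**power multiplications.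
import Mathlib
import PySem

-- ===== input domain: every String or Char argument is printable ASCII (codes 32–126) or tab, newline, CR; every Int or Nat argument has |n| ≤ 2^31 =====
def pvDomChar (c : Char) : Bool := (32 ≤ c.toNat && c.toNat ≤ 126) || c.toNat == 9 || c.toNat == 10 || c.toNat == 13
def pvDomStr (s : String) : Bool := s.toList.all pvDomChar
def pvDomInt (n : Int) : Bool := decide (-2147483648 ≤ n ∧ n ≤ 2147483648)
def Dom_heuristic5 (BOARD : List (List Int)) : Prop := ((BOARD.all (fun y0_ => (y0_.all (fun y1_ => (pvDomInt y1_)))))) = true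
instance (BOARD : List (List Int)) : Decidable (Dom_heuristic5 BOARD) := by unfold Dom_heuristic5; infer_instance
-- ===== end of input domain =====

-- B drops A's powers and index arithmetic entirely: it linearises the board into
-- snake order of descending significance and evaluates a base-4 Horner scheme.

-- ===== PORT A =====
-- floor(4 - (power+1)/4) with Python float true division: exact here as
-- 4 + floor(-(power+1)/4) = 4 + PySem.Int.floordiv (-(power+1)) 4 (floor of a rational).
def heuristic5 (BOARD : List (List Int)) : Int :=
  (PySem.List.pyRange 0 16 1).reverse.foldl
    (fun score power =>
      let i : Int := 4 + PySem.Int.floordiv (-(power + 1)) 4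
      let j : Int :=
        if PySem.Int.mod i 2 = 0 then
          PySem.Int.mod (4 - PySem.Int.mod (power + 1) 4) 4
        else
          PySem.Int.mod power 4
      -- BOARD[i][j]: in-range under Pre_, so getD is exact (Python would raise otherwise)
      let cell : Int := PySem.List.pyGetD ((PySem.List.pyGetD BOARD i [])) j 0
      if cell ≠ 0 then score + (4 : Int) ^ power.toNat * cell else score)
    0

-- ===== PORT B =====
-- snake_cells: js = range(4) or reversed(range(4)); BOARD[i][j] in-range under
-- Pre_, so pyGetD is exact (Python would raise IndexError otherwise);
-- cells.extend(generator) ported as append of the mapped list.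
def pvSnakeCells (BOARD : List (List Int)) : List Int :=
  (PySem.List.pyRange 0 4 1).foldl
    (fun cells i =>
      let js := if PySem.Int.mod i 2 = 0 then PySem.List.pyRange 0 4 1
                else (PySem.List.pyRange 0 4 1).reverse
      cells ++ js.map (fun j => PySem.List.pyGetD (PySem.List.pyGetD BOARD i []) j 0))
    []

def heuristic5_alt (BOARD : List (List Int)) : Int :=
  (pvSnakeCells BOARD).foldl (fun score c => score * 4 + c) 0

-- ===== PRECONDITION & SPEC =====
-- Pre_ excludes exactly the boards on which A raises IndexError: fewer than 4 rows,
-- or one of the first 4 rows shorter than 4 cells.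
def Pre_heuristic5 (BOARD : List (List Int)) : Prop :=
  4 ≤ BOARD.length ∧ ∀ row ∈ BOARD.take 4, 4 ≤ row.length
instance (BOARD : List (List Int)) : Decidable (Pre_heuristic5 BOARD) := by
  unfold Pre_heuristic5; infer_instance

def pvWitness_heuristic5 : List (List Int) :=
  [[2, 0, 4, 8], [0, 2, 0, 2], [4, 4, 0, 0], [2, 0, 0, 16]]

def Spec_heuristic5 (BOARD : List (List Int)) (out : Int) : Prop := out = heuristic5_alt BOARD
instance (BOARD : List (List Int)) (out : Int) : Decidable (Spec_heuristic5 BOARD out) := by unfold Spec_heuristic5; infer_instance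

-- ===== CLAIM =====
def Claim_equal_heuristic5 : Prop := ∀ (BOARD : List (List Int)), Dom_heuristic5 BOARD → Pre_heuristic5 BOARD → Spec_heuristic5 BOARD (heuristic5 BOARD)

-- ===== LEMMAS AND PROOFS =====

theorem pv_if_ne (s w v : Int) : (if v ≠ 0 then s + w * v else s) = s + w * v := by
  split_ifs with h
  · rfl
  · simp [not_not.mp h]

-- ===== VERDICT =====
theorem heuristic5_spec : Claim_equal_heuristic5 := by
  intro BOARD _ hPre
  obtain ⟨hlen, hrows⟩ := hPre
  match BOARD, hlen with
  | r0 :: r1 :: r2 :: r3 :: rest, _ =>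
    have h0 : 4 ≤ r0.length := hrows r0 (by simp)
    have h1 : 4 ≤ r1.length := hrows r1 (by simp)
    have h2 : 4 ≤ r2.length := hrows r2 (by simp)
    have h3 : 4 ≤ r3.length := hrows r3 (by simp)
    match r0, h0 with
    | a0 :: a1 :: a2 :: a3 :: _, _ =>
    match r1, h1 with
    | b0 :: b1 :: b2 :: b3 :: _, _ =>
    match r2, h2 with
    | c0 :: c1 :: c2 :: c3 :: _, _ =>
    match r3, h3 with
    | d0 :: d1 :: d2 :: d3 :: _, _ =>
      show heuristic5 _ = heuristic5_alt _
      have hr : PySem.List.pyRange 0 16 1 =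
          [0,1,2,3,4,5,6,7,8,9,10,11,12,13,14,15] := by decide
      have hr4 : PySem.List.pyRange 0 4 1 = [0,1,2,3] := by decide
      simp only [heuristic5, heuristic5_alt, pvSnakeCells, hr, hr4,
        List.reverse_cons, List.reverse_nil, List.nil_append, List.cons_append,
        List.foldl_cons, List.foldl_nil, pv_if_ne,
        PySem.Int.floordiv_eq_ediv_of_pos (show (0:Int) < 4 by norm_num),
        PySem.Int.mod_eq_emod_of_pos (show (0:Int) < 4 by norm_num),
        PySem.Int.mod_eq_emod_of_pos (show (0:Int) < 2 by norm_num)]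
      norm_num [PySem.List.pyGetD_ofNat', List.map]
      simp only [show Int.toNat 15 = 15 from rfl, show Int.toNat 14 = 14 from rfl,
        show Int.toNat 13 = 13 from rfl, show Int.toNat 12 = 12 from rfl,
        show Int.toNat 11 = 11 from rfl, show Int.toNat 10 = 10 from rfl,
        show Int.toNat 9 = 9 from rfl, show Int.toNat 8 = 8 from rfl,
        show Int.toNat 7 = 7 from rfl, show Int.toNat 6 = 6 from rfl,
        show Int.toNat 5 = 5 from rfl, show Int.toNat 4 = 4 from rfl,
        show Int.toNat 3 = 3 from rfl, show Int.toNat 2 = 2 from rfl]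
      norm_num
      ring
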